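-- pv_equiv track=rewrite | github.com/csgshaggy/sentinel-ops-suite | tools/plugins/package_integrity.py | _detect_namespace_collisions
-- ===== SOURCE A (Python) =====
-- from typing import List, Dict, Optional
--
-- def _detect_namespace_collisions(packages: List[str]) -> Dict[str, List[str]]:
--     """
--     Detect namespace collisions:
--     - multiple packages providing the same top-level namespace
--     """
--     collisions: Dict[str, List[str]] = {}
--
--     for pkg in packages:
--         parts = pkg.split(".")
--         if len(parts) > 1:
--             top = parts[0]
--             collisions.setdefault(top, []).append(pkg)
--
--     # Only return namespaces with >1 provider
--     return {k: v for k, v in collisions.items() if len(v) > 1}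
-- ===== SOURCE B (Python) =====
-- def _detect_namespace_collisions(packages):
--     rest = [p for p in packages if "." in p]
--     result = {}
--     while rest:
--         top = rest[0].split(".")[0]
--         group = [p for p in rest if p.split(".")[0] == top]
--         if len(group) > 1:
--             result[top] = group
--         rest = [p for p in rest if p.split(".")[0] != top]
--     return result
-- ===== Notes on version B (the rewrite author's own statement) =====
-- stated objective: alternative
-- what changed: A builds a dict grouping every dotted package by top-level namespace in one pass and filters the dict at the end; B uses a dict-free extract-group worklist loop: it repeatedly takes the first remaining dotted package's namespace, scans the worklist to extract that whole group (kept only if it has more than one member), and shrinks the worklist, so groups are emitted one namespace at a time.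
import Mathlib
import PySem

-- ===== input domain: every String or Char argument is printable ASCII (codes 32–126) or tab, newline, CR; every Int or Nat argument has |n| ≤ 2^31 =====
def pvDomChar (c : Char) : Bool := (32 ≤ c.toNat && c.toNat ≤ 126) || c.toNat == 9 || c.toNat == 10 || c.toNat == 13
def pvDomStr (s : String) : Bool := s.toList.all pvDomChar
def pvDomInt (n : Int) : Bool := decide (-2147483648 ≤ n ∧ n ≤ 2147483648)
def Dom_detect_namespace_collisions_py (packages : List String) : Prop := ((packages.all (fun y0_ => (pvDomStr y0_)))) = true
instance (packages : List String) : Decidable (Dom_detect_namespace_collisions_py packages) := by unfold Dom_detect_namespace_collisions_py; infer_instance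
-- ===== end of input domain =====

-- B replaces A's single-pass dict grouping by a dict-free extract-group worklist loop:
-- repeatedly take the first remaining dotted package's namespace, scan the worklist for that
-- whole group (kept only if it collides), and shrink the worklist (objective: alternative).

-- ===== PORT A =====
def detect_namespace_collisions_py (packages : List String) : List (String × List String) :=
  let collisions : PySem.Dict String (List String) :=
    packages.foldl (fun d pkg =>
      -- parts = pkg.split(".")   (sep "." ≠ "", so split? is always `some`)
      let parts := (PySem.Str.split? pkg ".").getD []
      if parts.length > 1 then
        -- collisions.setdefault(top, []).append(pkg)  ≡  d[top] = d.get(top, []) + [pkg]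
        d.modify (PySem.List.pyGetD parts 0 "") [] (· ++ [pkg])
      else d) PySem.Dict.empty
  -- {k: v for k, v in collisions.items() if len(v) > 1}
  (collisions.items).filter (fun kv => kv.2.length > 1)

-- ===== PORT B =====
-- B-side helper: p.split(".")[0]
def pvTopB (p : String) : String := PySem.List.pyGetD ((PySem.Str.split? p ".").getD []) 0 ""

-- the while loop of Source B: state = (rest, result)
def pvDetectLoop (rest : List String) (result : List (String × List String)) :
    List (String × List String) :=
  match rest with
  | [] => result
  | h :: t =>
    let top := pvTopB h
    let group := (h :: t).filter (fun p => pvTopB p == top)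
    pvDetectLoop ((h :: t).filter (fun p => !(pvTopB p == top)))
      (if group.length > 1 then result ++ [(top, group)] else result)
termination_by rest.length
decreasing_by
  rw [List.filter_cons_of_neg (by simp)]
  exact Nat.lt_succ_of_le (List.length_filter_le _ t)

def detect_namespace_collisions_py_alt (packages : List String) : List (String × List String) :=
  -- rest = [p for p in packages if "." in p]; result = {}; while rest: …
  pvDetectLoop (packages.filter (fun p => PySem.Str.isIn "." p)) []

-- ===== PRECONDITION & SPEC =====
def Spec_detect_namespace_collisions_py (packages : List String) (out : List (String × List String)) : Prop := out = detect_namespace_collisions_py_alt packages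
instance (packages : List String) (out : List (String × List String)) : Decidable (Spec_detect_namespace_collisions_py packages out) := by unfold Spec_detect_namespace_collisions_py; infer_instance

-- ===== CLAIM (what is proved, stated in full; the proofs are below) =====
def Claim_equal_detect_namespace_collisions_py : Prop := ∀ (packages : List String), Dom_detect_namespace_collisions_py packages → Spec_detect_namespace_collisions_py packages (detect_namespace_collisions_py packages)

-- ===== LEMMAS AND PROOFS =====

-- the grouping fold A performs on the dotted packages
def pvGroup (l : List String) : PySem.Dict String (List String) :=
  l.foldl (fun d p => d.modify (pvTopB p) [] (· ++ [p])) PySem.Dict.empty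

-- splitting on the single-char separator "." yields 1 + (number of '.' characters) pieces
theorem pv_splitOn_go_length (fuel : Nat) :
    ∀ (l cur : List Char) (acc : List (List Char)), l.length ≤ fuel →
      (PySem.Chars.splitOn.go ['.'] fuel l cur acc).length = acc.length + 1 + l.count '.' := by
  induction fuel with
  | zero =>
    intro l cur acc h
    have : l = [] := List.length_eq_zero_iff.mp (Nat.le_zero.mp h)
    subst this
    simp [PySem.Chars.splitOn.go]
  | succ n ih =>
    intro l cur acc h
    match l with
    | [] => simp [PySem.Chars.splitOn.go]
    | c :: rest =>
      simp only [PySem.Chars.splitOn.go]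
      by_cases hc : c = '.'
      · subst hc
        rw [if_pos (by simp [List.isPrefixOf])]
        simp only [List.length_cons] at h
        rw [ih _ _ _ (by simpa using Nat.le_of_succ_le_succ h)]
        simp
        omega
      · rw [if_neg (by simp [List.isPrefixOf]; exact fun hh => hc hh.symm)]
        simp only [List.length_cons] at h
        rw [ih _ _ _ (Nat.le_of_succ_le_succ h)]
        simp [hc]

-- A's and B's guards agree:  "." in p  ↔  len(p.split(".")) > 1
theorem pv_cond_eq (p : String) :
    PySem.Str.isIn "." p = (((PySem.Str.split? p ".").getD []).length > 1 : Bool) := by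
  have hlen : ((PySem.Str.split? p ".").getD []).length = 1 + p.toList.count '.' := by
    simp [PySem.Str.split?, PySem.Chars.split?, PySem.Chars.splitOn]
    rw [pv_splitOn_go_length _ _ _ _ (by simp)]
    simp
  rcases h : PySem.Str.isIn "." p with _ | _
  · have := (PySem.Str.isIn_iff_infix "." p)
    rw [h] at this
    have hm : '.' ∉ p.toList := by
      intro hm
      exact absurd ((List.singleton_infix_iff _ _).mpr (by simpa using hm)) (by simpa using this)
    have : p.toList.count '.' = 0 := List.count_eq_zero.mpr hm
    simp [hlen, this]
  · have := ((PySem.Str.isIn_iff_infix "." p).mp h)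
    have hm : '.' ∈ p.toList := (List.singleton_infix_iff '.' p.toList).mp (by simpa using this)
    have : 0 < p.toList.count '.' := List.count_pos_iff.mpr hm
    simp [hlen]
    omega

-- building a set from a filtered list = filtering the built set
theorem pv_update_filter {α : Type} [BEq α] [LawfulBEq α] (c : α → Bool) :
    ∀ (l s : List α), (PySem.Set.update s l).filter c = PySem.Set.update (s.filter c) (l.filter c) := by
  intro l
  induction l with
  | nil => intro s; simp [PySem.Set.update]
  | cons x l ih =>
    intro s
    have hstep : PySem.Set.update s (x :: l) = PySem.Set.update (PySem.Set.add s x) l := by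
      simp [PySem.Set.update]
    rw [hstep, ih]
    by_cases hc : c x = true
    · have : (PySem.Set.add s x).filter c = PySem.Set.add (s.filter c) x := by
        simp only [PySem.Set.add, PySem.Set.contains] at *
        by_cases hm : x ∈ s
        · rw [if_pos (by simpa using hm), if_pos (by simp [hm, hc])]
        · rw [if_neg (by simpa using hm), if_neg (by simp [hm]), List.filter_append]
          simp [hc]
      rw [this]
      simp only [List.filter_cons, hc]
      simp [PySem.Set.update]
    · have : (PySem.Set.add s x).filter c = s.filter c := by
        simp only [PySem.Set.add, PySem.Set.contains]
        by_cases hm : x ∈ s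
        · rw [if_pos (by simpa using hm)]
        · rw [if_neg (by simpa using hm), List.filter_append]
          simp [hc]
      rw [this]
      simp [hc]

theorem pv_dedup_filter {α : Type} [BEq α] [LawfulBEq α] (l : List α) (c : α → Bool) :
    PySem.List.dedup (l.filter c) = (PySem.List.dedup l).filter c := by
  have h1 : PySem.List.dedup l = PySem.Set.update [] l := rfl
  have h2 : PySem.List.dedup (l.filter c) = PySem.Set.update [] (l.filter c) := rfl
  rw [h1, h2, pv_update_filter c l []]
  rfl

-- Python's dict.fromkeys-style dedup, unfolded one element: the head, then the dedup of the
-- tail with all copies of the head removed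
theorem pv_dedup_cons {α : Type} [BEq α] [LawfulBEq α] (x : α) (l : List α) :
    PySem.List.dedup (x :: l) = x :: PySem.List.dedup (l.filter (fun y => !(y == x))) := by
  rw [PySem.List.dedup_eq_ofList, PySem.Set.ofList_cons]
  congr 1
  have hd : PySem.Set.discard (PySem.Set.ofList l) x
      = (PySem.Set.ofList l).filter (fun y => !(y == x)) := rfl
  rw [hd, pv_dedup_filter]
  rfl

-- the grouping fold, characterised: first-occurrence key order, per-key sublists in list order
theorem pv_group_items (l : List String) :
    (pvGroup l).items =
      (PySem.List.dedup (l.map pvTopB)).map (fun k => (k, l.filter (fun p => pvTopB p == k))) := by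
  have hnodup : (pvGroup l).keys.Nodup :=
    PySem.Dict.nodup_keys_foldl_modify_key l pvTopB [] (fun d x v => v ++ [x]) PySem.Dict.empty
      (by simp [PySem.Dict.empty, PySem.Dict.keys])
  have hkeys : (pvGroup l).keys = PySem.List.dedup (l.map pvTopB) := by
    have := PySem.Dict.keys_foldl_modify_key l pvTopB [] (fun d x v => v ++ [x]) PySem.Dict.empty
    simpa [pvGroup, PySem.List.dedup, PySem.Set.ofList, PySem.Set.update, PySem.Dict.empty,
      PySem.Dict.keys] using this
  rw [PySem.Dict.items_eq_map_keys _ hnodup [], hkeys]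
  apply List.map_congr_left
  intro k hk
  congr 1
  have hfold : pvGroup l = (l.map (fun p => (pvTopB p, p))).foldl
      (fun d q => d.modify q.1 [] (· ++ [q.2])) PySem.Dict.empty := by
    rw [List.foldl_map]
    rfl
  rw [hfold, PySem.Dict.getD_foldl_modify_append, List.filter_map]
  simp only [List.map_map]
  simp [PySem.Dict.empty, PySem.Dict.getD, PySem.Dict.get?]
  exact (List.map_id _)

-- B's worklist loop, characterised: the same canonical form as A's grouped dict
theorem pv_loop (n : Nat) :
    ∀ (rest : List String) (acc : List (String × List String)), rest.length ≤ n →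
      pvDetectLoop rest acc = acc ++
        ((PySem.List.dedup (rest.map pvTopB)).map
          (fun k => (k, rest.filter (fun p => pvTopB p == k)))).filter
            (fun kv => kv.2.length > 1) := by
  induction n with
  | zero =>
    intro rest acc h
    have : rest = [] := List.length_eq_zero_iff.mp (Nat.le_zero.mp h)
    subst this
    simp [pvDetectLoop, PySem.List.dedup, PySem.Set.ofList]
  | succ n ih =>
    intro rest acc h
    match rest with
    | [] => simp [pvDetectLoop, PySem.List.dedup, PySem.Set.ofList]
    | h0 :: t =>
      rw [pvDetectLoop]
      set top := pvTopB h0 with htop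
      set group := (h0 :: t).filter (fun p => pvTopB p == top) with hgroup
      have hrest't : (h0 :: t).filter (fun p => !(pvTopB p == top))
          = t.filter (fun p => !(pvTopB p == top)) := by
        rw [List.filter_cons_of_neg (by simp [htop])]
      have hlen' : ((h0 :: t).filter (fun p => !(pvTopB p == top))).length ≤ n := by
        rw [hrest't]
        exact le_trans (List.length_filter_le _ t)
          (by simpa using Nat.le_of_succ_le_succ h)
      rw [ih _ _ hlen']
      set rest' := (h0 :: t).filter (fun p => !(pvTopB p == top)) with hrest'
      -- dedup of the tops of h0::t = top followed by dedup of the tops of rest'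
      have hded : PySem.List.dedup ((h0 :: t).map pvTopB)
          = top :: PySem.List.dedup (rest'.map pvTopB) := by
        rw [List.map_cons, ← htop, pv_dedup_cons]
        congr 2
        rw [hrest't, List.filter_map]
        rfl
      -- on keys of rest', filtering rest' is the same as filtering h0::t
      have htail : (PySem.List.dedup (rest'.map pvTopB)).map
            (fun k => (k, rest'.filter (fun p => pvTopB p == k)))
          = (PySem.List.dedup (rest'.map pvTopB)).map
            (fun k => (k, (h0 :: t).filter (fun p => pvTopB p == k))) := by
        apply List.map_congr_left
        intro k hk
        have hk' : k ∈ rest'.map pvTopB := by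
          rw [PySem.List.dedup_eq_ofList] at hk
          exact (PySem.Set.mem_ofList _ _).mp hk
        obtain ⟨p, hp, hpk⟩ := List.mem_map.mp hk'
        have hkne : (k == top) = false := by
          have hpf := List.of_mem_filter hp
          rw [hpk] at hpf
          simpa using hpf
        congr 1
        rw [hrest', List.filter_filter]
        apply List.filter_congr
        intro q _
        by_cases hq : pvTopB q == k
        · have : (pvTopB q == top) = false := by
            have : pvTopB q = k := by simpa using hq
            rw [this]
            exact hkne
          simp [hq, this]
        · simp [hq]
      rw [hded, List.map_cons, ← htail]
      rw [← hgroup, List.filter_cons]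
      by_cases hg : group.length > 1
      · simp [hg]
      · simp [hg]

theorem pv_main (packages : List String) :
    detect_namespace_collisions_py packages = detect_namespace_collisions_py_alt packages := by
  simp only [detect_namespace_collisions_py, detect_namespace_collisions_py_alt]
  have hA : (packages.foldl (fun d pkg =>
      let parts := (PySem.Str.split? pkg ".").getD []
      if parts.length > 1 then
        d.modify (PySem.List.pyGetD parts 0 "") [] (· ++ [pkg])
      else d) PySem.Dict.empty) = pvGroup (packages.filter (fun p => PySem.Str.isIn "." p)) := by
    have h1 : packages.filter (fun p => PySem.Str.isIn "." p)
        = packages.filter (fun p => (((PySem.Str.split? p ".").getD []).length > 1 : Bool)) :=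
      List.filter_congr (fun p _ => pv_cond_eq p)
    rw [h1, pvGroup, List.foldl_filter]
    simp only [decide_eq_true_eq]
    rfl
  rw [hA, pv_group_items,
    pv_loop (packages.filter (fun p => PySem.Str.isIn "." p)).length _ _ le_rfl,
    List.nil_append]

-- ===== VERDICT (by name: the statement is the Claim_ definition above) =====
theorem detect_namespace_collisions_py_spec : Claim_equal_detect_namespace_collisions_py := by
  intro packages _
  exact pv_main packages
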